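-- pv_equiv track=rewrite | github.com/Abilash-Sivasith/Advent_Of_Code_2024 | day_2/day_2_part_2.py | contains_multiple_duplicates
-- ===== SOURCE A (Python) =====
-- def contains_multiple_duplicates(list_of_nums):
--     """returns true if the list contains multiple duplicates"""
--     seen_dict = dict()
--     for num in list_of_nums:
--         if num not in seen_dict:
--             seen_dict[num] = 1
--         else:
--             seen_dict[num] += 1
--
--     dups_seen = 0
--     for key, value in seen_dict.items():
--         if value == 2:
--             dups_seen += 1
--         elif value >= 3:
--             return True
--
--         if dups_seen >= 2:
--             return True
--
--     return False
-- ===== SOURCE B (Python) =====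
-- def contains_multiple_duplicates(list_of_nums):
--     """returns true if the list contains multiple duplicates"""
--     counts = {}
--     pairs = 0
--     for num in list_of_nums:
--         c = counts.get(num, 0) + 1
--         counts[num] = c
--         if c == 3:
--             return True
--         if c == 2:
--             pairs += 1
--             if pairs >= 2:
--                 return True
--     return False
-- ===== Notes on version B (the rewrite author's own statement) =====
-- stated objective: faster
-- what changed: Fuses A's two sequential passes (build a full count dict, then scan its items) into a single decide-as-you-go pass that maintains a running counts dict and a pairs counter, returning as soon as a count reaches 3 or a second distinct value reaches 2.
import Mathlib
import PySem

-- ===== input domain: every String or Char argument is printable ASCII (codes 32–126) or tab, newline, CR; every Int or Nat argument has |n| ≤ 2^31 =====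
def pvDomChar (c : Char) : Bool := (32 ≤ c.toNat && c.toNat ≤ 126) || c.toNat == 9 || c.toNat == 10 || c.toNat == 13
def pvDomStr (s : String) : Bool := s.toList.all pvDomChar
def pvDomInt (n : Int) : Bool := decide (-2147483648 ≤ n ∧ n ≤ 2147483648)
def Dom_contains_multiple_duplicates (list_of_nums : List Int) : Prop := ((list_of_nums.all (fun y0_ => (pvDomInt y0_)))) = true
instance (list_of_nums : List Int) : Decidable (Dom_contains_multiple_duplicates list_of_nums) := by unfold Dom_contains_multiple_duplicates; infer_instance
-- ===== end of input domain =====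

-- B fuses A's two passes (count dict, then scan of its items) into one early-exit pass; equal return value proved.


-- ===== PORT A =====
-- the second loop: 'for key, value in seen_dict.items(): …' with early returns
def cmdScanItems : List (Int × Int) → Int → Bool
  | [], _ => false
  | (_, value) :: rest, dups_seen =>
    if value = 2 then
      let dups_seen := dups_seen + 1
      if 2 ≤ dups_seen then true else cmdScanItems rest dups_seen
    else if 3 ≤ value then true
    else if 2 ≤ dups_seen then true else cmdScanItems rest dups_seen

def contains_multiple_duplicates (list_of_nums : List Int) : Bool :=
  let seen_dict := list_of_nums.foldl
    (fun d num => if d.contains num = false then d.insert num 1 else d.modify num 0 (· + 1))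
    PySem.Dict.empty
  cmdScanItems seen_dict.items 0

-- ===== PORT B =====
-- single fused pass: counts dict + pairs counter, early return
def cmdFusedLoop : List Int → PySem.Dict Int Int → Int → Bool
  | [], _, _ => false
  | num :: rest, counts, pairs =>
    let c := counts.getD num 0 + 1
    let counts := counts.insert num c
    if c = 3 then true
    else if c = 2 then
      let pairs := pairs + 1
      if 2 ≤ pairs then true else cmdFusedLoop rest counts pairs
    else cmdFusedLoop rest counts pairs

def contains_multiple_duplicates_alt (list_of_nums : List Int) : Bool :=
  cmdFusedLoop list_of_nums PySem.Dict.empty 0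

-- ===== PRECONDITION & SPEC =====
def Spec_contains_multiple_duplicates (list_of_nums : List Int) (out : Bool) : Prop := out = contains_multiple_duplicates_alt list_of_nums
instance (list_of_nums : List Int) (out : Bool) : Decidable (Spec_contains_multiple_duplicates list_of_nums out) := by unfold Spec_contains_multiple_duplicates; infer_instance

-- ===== CLAIM (what is proved, stated in full; the proofs are below) =====
def Claim_equal_contains_multiple_duplicates : Prop := ∀ (list_of_nums : List Int), Dom_contains_multiple_duplicates list_of_nums → Spec_contains_multiple_duplicates list_of_nums (contains_multiple_duplicates list_of_nums)

-- ===== LEMMAS AND PROOFS =====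

-- common reference value: "some element occurs ≥ 3 times, or ≥ 2 distinct elements occur ≥ 2 times"
def cmdSpec (l : List Int) : Bool :=
  (PySem.Set.ofList l).any (fun x => 3 ≤ l.count x)
    || decide (2 ≤ (PySem.Set.ofList l).countP (fun x => 2 ≤ l.count x))

-- a list containing two distinct satisfying elements has countP ≥ 2
theorem cmd_countP_two {α : Type} {l : List α} {p : α → Bool} {x y : α}
    (hx : x ∈ l) (hy : y ∈ l) (hxy : x ≠ y) (hpx : p x = true) (hpy : p y = true) :
    2 ≤ l.countP p := by
  have hxf : x ∈ l.filter p := List.mem_filter.mpr ⟨hx, hpx⟩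
  have hyf : y ∈ l.filter p := List.mem_filter.mpr ⟨hy, hpy⟩
  rw [List.countP_eq_length_filter]
  match hf : l.filter p with
  | [] => rw [hf] at hxf; cases hxf
  | [a] =>
    rw [hf] at hxf hyf
    cases List.mem_singleton.mp hxf; cases List.mem_singleton.mp hyf; exact absurd rfl hxy
  | a :: b :: t => simp

theorem cmd_spec_true_of_three {l : List Int} {x : Int} (hx : x ∈ l) (h3 : 3 ≤ l.count x) :
    cmdSpec l = true := by
  unfold cmdSpec
  have : (PySem.Set.ofList l).any (fun x => 3 ≤ l.count x) = true :=
    List.any_eq_true.mpr ⟨x, (PySem.Set.mem_ofList _ _).mpr hx, by simpa using h3⟩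
  simp [this]

theorem cmd_spec_true_of_two_pairs {l : List Int} {x y : Int}
    (hx : x ∈ l) (hy : y ∈ l) (hxy : x ≠ y) (h2x : 2 ≤ l.count x) (h2y : 2 ≤ l.count y) :
    cmdSpec l = true := by
  unfold cmdSpec
  have h2 : 2 ≤ (PySem.Set.ofList l).countP (fun x => 2 ≤ l.count x) :=
    cmd_countP_two ((PySem.Set.mem_ofList _ _).mpr hx) ((PySem.Set.mem_ofList _ _).mpr hy)
      hxy (by simpa using h2x) (by simpa using h2y)
  simp [h2]

theorem cmd_spec_false {l : List Int}
    (hle : ∀ x ∈ l, l.count x ≤ 2)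
    (hp : (PySem.Set.ofList l).countP (fun x => l.count x = 2) ≤ 1) :
    cmdSpec l = false := by
  unfold cmdSpec
  have hmem : ∀ x, x ∈ PySem.Set.ofList l → x ∈ l := fun x h => (PySem.Set.mem_ofList _ _).mp h
  have hany : (PySem.Set.ofList l).any (fun x => 3 ≤ l.count x) = false := by
    rw [List.any_eq_false]
    intro x hxm
    have := hle x (hmem x hxm)
    simp; omega
  have hcp : (PySem.Set.ofList l).countP (fun x => 2 ≤ l.count x)
      = (PySem.Set.ofList l).countP (fun x => l.count x = 2) := by
    apply List.countP_congr
    intro x hxm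
    have := hle x (hmem x hxm)
    simp; omega
  simp [hany, hcp]
  omega

theorem cmd_fold_eq_counter (l : List Int) :
    l.foldl (fun d num => if d.contains num = false then d.insert num 1 else d.modify num 0 (· + 1))
      PySem.Dict.empty = PySem.Dict.counter l := by
  rw [PySem.Dict.counter_eq_foldl]
  apply PySem.List.foldl_congr_mem
  intro d x _
  cases h : d.contains x with
  | true => simp
  | false => simp [PySem.Dict.modify, PySem.Dict.insert, h, PySem.Dict.getD_of_not_contains (h := h)]

theorem cmd_scan_eq (ps : List (Int × Int)) : ∀ dups : Int, dups ≤ 1 →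
    cmdScanItems ps dups
      = (ps.any (fun p => 3 ≤ p.2) || decide (2 ≤ dups + (ps.countP (fun p => p.2 = 2) : Int))) := by
  induction ps with
  | nil => intro dups hd; simp [cmdScanItems]; omega
  | cons p rest ih =>
    intro dups hd
    obtain ⟨k, v⟩ := p
    by_cases hv2 : v = 2
    · by_cases hge : 2 ≤ dups + 1
      · simp [cmdScanItems, hv2, hge]
        omega
      · rw [show cmdScanItems ((k, v) :: rest) dups = cmdScanItems rest (dups + 1) by
          simp [cmdScanItems, hv2, hge]]
        rw [ih (dups + 1) (by omega)]
        simp only [List.any_cons, List.countP_cons, hv2]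
        norm_num
        congr 1
        simp only [decide_eq_decide]
        omega
    · by_cases hv3 : 3 ≤ v
      · simp [cmdScanItems, hv2, hv3]
      · rw [show cmdScanItems ((k, v) :: rest) dups = cmdScanItems rest dups by
          simp [cmdScanItems, hv2, hv3]; omega]
        rw [ih dups hd]
        simp [hv2, hv3]

theorem cmd_A_eq_spec (l : List Int) :
    cmdScanItems (PySem.Dict.counter l).items 0 = cmdSpec l := by
  rw [PySem.Dict.items_counter]
  rw [cmd_scan_eq _ 0 (by norm_num)]
  unfold cmdSpec
  rw [List.any_map, List.countP_map]
  by_cases hany : (PySem.Set.ofList l).any (fun x => 3 ≤ l.count x) = true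
  · have : (PySem.Set.ofList l).any ((fun p => decide (3 ≤ p.2)) ∘ (fun k => (k, (l.count k : Int)))) = true := by
      rcases List.any_eq_true.mp hany with ⟨x, hx, hp⟩
      refine List.any_eq_true.mpr ⟨x, hx, ?_⟩
      simp at hp ⊢; exact_mod_cast hp
    simp [this, hany]
  · have hany' : (PySem.Set.ofList l).any ((fun p => decide (3 ≤ p.2)) ∘ (fun k => (k, (l.count k : Int)))) = false := by
      rw [List.any_eq_false]; intro x hx
      have := List.any_eq_false.mp (Bool.eq_false_iff.mpr hany) x hx
      simp at this ⊢; exact_mod_cast this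
    have hle : ∀ x ∈ PySem.Set.ofList l, l.count x ≤ 2 := by
      intro x hx
      have := List.any_eq_false.mp (Bool.eq_false_iff.mpr hany) x hx
      simp at this; omega
    have hcp : (PySem.Set.ofList l).countP ((fun p => decide (p.2 = 2)) ∘ (fun k => (k, (l.count k : Int))))
        = (PySem.Set.ofList l).countP (fun x => 2 ≤ l.count x) := by
      apply List.countP_congr
      intro x hx
      have := hle x hx
      simp only [Function.comp, decide_eq_true_eq]
      omega
    rw [Bool.not_eq_true] at hany
    rw [hany', hany, hcp]
    simp only [Bool.false_or, decide_eq_decide]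
    omega

theorem cmd_add_of_mem {s : PySem.Set Int} {x : Int} (h : x ∈ s) : PySem.Set.add s x = s := by
  simp [PySem.Set.add, PySem.Set.contains, h]

theorem cmd_add_of_not_mem {s : PySem.Set Int} {x : Int} (h : x ∉ s) : PySem.Set.add s x = s ++ [x] := by
  simp [PySem.Set.add, PySem.Set.contains, h]

theorem cmd_ofList_append (l : List Int) (x : Int) :
    PySem.Set.ofList (l ++ [x]) = PySem.Set.add (PySem.Set.ofList l) x := by
  rw [PySem.Set.ofList_eq_foldl, PySem.Set.ofList_eq_foldl, List.foldl_append]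
  rfl

theorem cmd_countP_flip {l : List Int} {p q : Int → Bool} {x : Int} (hnd : l.Nodup) (hx : x ∈ l)
    (hag : ∀ y ∈ l, y ≠ x → p y = q y) (hpx : p x = false) (hqx : q x = true) :
    l.countP q = l.countP p + 1 := by
  induction l with
  | nil => cases hx
  | cons a t ih =>
    have hnd' := (List.nodup_cons.mp hnd).2
    have hax := (List.nodup_cons.mp hnd).1
    rcases List.mem_cons.mp hx with rfl | hxt
    · have ht : t.countP q = t.countP p := by
        apply List.countP_congr
        intro y hy
        have := hag y (List.mem_cons_of_mem _ hy) (by rintro rfl; exact hax hy)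
        simp [this]
      simp [List.countP_cons, hpx, hqx, ht]
    · have hax' : a ≠ x := by rintro rfl; exact hax hxt
      have hh := hag a List.mem_cons_self hax'
      rw [List.countP_cons, List.countP_cons, hh,
        ih hnd' hxt (fun y hy hyx => hag y (List.mem_cons_of_mem _ hy) hyx)]
      omega

theorem cmd_fused_eq (rest : List Int) : ∀ (base : List Int) (counts : PySem.Dict Int Int) (pairs : Int),
    (∀ x, counts.getD x 0 = (base.count x : Int)) →
    (∀ x, base.count x ≤ 2) →
    pairs = ((PySem.Set.ofList base).countP (fun x => base.count x = 2) : Int) →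
    pairs ≤ 1 →
    cmdFusedLoop rest counts pairs = cmdSpec (base ++ rest) := by
  induction rest with
  | nil =>
    intro base counts pairs hc hle hp hp1
    rw [List.append_nil]
    rw [show cmdFusedLoop [] counts pairs = false from rfl]
    refine (cmd_spec_false (fun x _ => hle x) ?_).symm
    omega
  | cons num rest ih =>
    intro base counts pairs hc hle hp hp1
    have hkey : ∀ x, ((counts.insert num (counts.getD num 0 + 1)).getD x 0) = (((base ++ [num]).count x : Int)) := by
      intro x
      rw [PySem.Dict.getD_insert]
      by_cases hx : x = num
      · subst hx
        simp [List.count_append, hc x]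
      · simp [hx, hc x, List.count_append, List.count_singleton]
        exact fun h => hx h.symm
    have hcount : counts.getD num 0 = (base.count num : Int) := hc num
    by_cases h3 : counts.getD num 0 + 1 = 3
    · -- third occurrence: both sides true
      rw [show cmdFusedLoop (num :: rest) counts pairs = true by
        simp only [cmdFusedLoop]; rw [if_pos h3]]
      refine (cmd_spec_true_of_three (x := num) ?_ ?_).symm
      · simp
      · have : base.count num = 2 := by omega
        rw [List.count_append]
        simp [this]
        omega
    · by_cases h2 : counts.getD num 0 + 1 = 2
      · have hb1 : base.count num = 1 := by omega
        have hmem : num ∈ base := List.count_pos_iff.mp (by omega)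
        by_cases hpge : 2 ≤ pairs + 1
        · -- a second pair completes: both sides true
          have hpair1 : 0 < (PySem.Set.ofList base).countP (fun x => base.count x = 2) := by omega
          obtain ⟨y, hy, hpy⟩ := List.countP_pos_iff.mp hpair1
          have hymem : y ∈ base := (PySem.Set.mem_ofList _ _).mp hy
          have hy2 : base.count y = 2 := by simpa using hpy
          rw [show cmdFusedLoop (num :: rest) counts pairs = true by
            simp only [cmdFusedLoop]; rw [if_neg h3, if_pos h2, if_pos hpge]]
          refine (cmd_spec_true_of_two_pairs (x := num) (y := y) ?_ ?_ ?_ ?_ ?_).symm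
          · simp
          · simp [hymem]
          · rintro rfl; omega
          · rw [List.count_append]; simp [hb1]; omega
          · rw [List.count_append]; omega
        · -- first pair: recurse
          rw [show cmdFusedLoop (num :: rest) counts pairs
              = cmdFusedLoop rest (counts.insert num (counts.getD num 0 + 1)) (pairs + 1) by
            simp only [cmdFusedLoop]; rw [if_neg h3, if_pos h2, if_neg hpge]]
          rw [ih (base ++ [num]) _ (pairs + 1) hkey ?hle2 ?hp2 (by omega)]
          · rw [List.append_assoc]; rfl
          case hle2 =>
            intro x
            by_cases hx : x = num
            · subst hx; simp [List.count_append, hb1]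
            · simp [List.count_append, eq_comm (a := num), hx, hle x]
          case hp2 =>
            have hpz : pairs = 0 := by omega
            have hcp0 : (PySem.Set.ofList base).countP (fun x => base.count x = 2) = 0 := by omega
            rw [cmd_ofList_append, cmd_add_of_mem ((PySem.Set.mem_ofList _ _).mpr hmem)]
            have : (PySem.Set.ofList base).countP (fun x => (base ++ [num]).count x = 2)
                = (PySem.Set.ofList base).countP (fun x => base.count x = 2) + 1 := by
              apply cmd_countP_flip (PySem.Set.nodup_ofList _) ((PySem.Set.mem_ofList _ _).mpr hmem)
              · intro y hy hyx
                simp [List.count_append, eq_comm (a := num), hyx]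
              · simp [hb1]
              · simp [List.count_append, hb1]
            rw [this, hcp0, hpz]
            norm_num
      · -- first occurrence: recurse with pairs unchanged
        have hb0 : base.count num = 0 := by have := hle num; omega
        have hnmem : num ∉ base := List.count_eq_zero.mp hb0
        rw [show cmdFusedLoop (num :: rest) counts pairs
            = cmdFusedLoop rest (counts.insert num (counts.getD num 0 + 1)) pairs by
          simp only [cmdFusedLoop]; rw [if_neg h3, if_neg h2]]
        rw [ih (base ++ [num]) _ pairs hkey ?hle2 ?hp2 hp1]
        · rw [List.append_assoc]; rfl
        case hle2 =>
          intro x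
          by_cases hx : x = num
          · subst hx; simp [List.count_append, hb0]
          · simp [List.count_append, eq_comm (a := num), hx, hle x]
        case hp2 =>
          rw [cmd_ofList_append, cmd_add_of_not_mem (fun h => hnmem ((PySem.Set.mem_ofList _ _).mp h))]
          rw [List.countP_append]
          have h1 : (PySem.Set.ofList base).countP (fun x => (base ++ [num]).count x = 2)
              = (PySem.Set.ofList base).countP (fun x => base.count x = 2) := by
            apply List.countP_congr
            intro y hy
            have hyb : y ∈ base := (PySem.Set.mem_ofList _ _).mp hy
            have hyx : y ≠ num := by rintro rfl; exact hnmem hyb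
            simp [List.count_append, eq_comm (a := num), hyx]
          have h2' : List.countP (fun x => decide ((base ++ [num]).count x = 2)) [num] = 0 := by
            simp [List.count_append, hb0]
          rw [h1, h2', hp]
          norm_num

-- ===== VERDICT (by name: the statement is the Claim_ definition above) =====
theorem contains_multiple_duplicates_spec : Claim_equal_contains_multiple_duplicates := by
  intro l _
  unfold Spec_contains_multiple_duplicates contains_multiple_duplicates contains_multiple_duplicates_alt
  rw [cmd_fold_eq_counter, cmd_A_eq_spec]
  rw [cmd_fused_eq l [] PySem.Dict.empty 0 (by intro x; simp) (by intro x; simp)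
    (by simp [PySem.Set.ofList]) (by norm_num)]
  rfl
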